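-- pv_equiv track=rewrite | github.com/MarcoLoPinto/NLP-NamedEntityRecognition | model/test3/NERDataset.py | generate_windows_sentence
-- ===== SOURCE A (Python) =====
-- def generate_windows_sentence(data, window_size, window_shift, pad_token = None, pad_index = -1):
--     """
--     Args:
--         - data: it is a list of lists of strings (words)
--         - window_size: the maximum size of a sentence. Bigger sentences generates two or more windows
--         - window_shift: the amount of shift from the last window of the same sentence to make. if it's equal to window_size then the current window starts after the end of the other
--         - pad_token: the string format of the token (could be also None).
--         - pad_index: the padding index for labels (used to remove them from the loss function) \n
--     Returns:
--         list of windows of strings (words)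
--     """
--     windowed_data = []
--     for sentence in data:
--         windowed_inputs = [sentence[i:i+window_size] for i in range(0, len(sentence), window_shift)]
--
--         for window_input in windowed_inputs:
--             window_input = window_input + [pad_token]*(window_size - len(window_input))
--             windowed_data.append(window_input)
--
--     return windowed_data
-- ===== SOURCE B (Python) =====
-- def generate_windows_sentence(data, window_size, window_shift, pad_token=None, pad_index=-1):
--     width = max(window_size, 0)
--     windowed_data = []
--     for sentence in data:
--         if window_shift <= 0:
--             continue
--         rest = sentence
--         while rest:
--             window = rest[:width]
--             windowed_data.append(window + [pad_token] * (width - len(window)))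
--             rest = rest[window_shift:]
--     return windowed_data
-- ===== Notes on version B (the rewrite author's own statement) =====
-- stated objective: alternative
-- what changed: B replaces A's index-range-and-slice comprehension plus per-window padding append by a suffix walk: it repeatedly emits the padded prefix of the remaining sentence and drops window_shift elements until the suffix is empty, never computing start indices or slice bounds.
-- intended difference: When window_size < 0, window_shift > 0 and some sentence is longer than -window_size, A's stop index i+window_size wraps around as a negative slice bound and A returns windows containing leftover words (e.g. ['a','b'] for window_size=-3), while B returns the empty window a non-positive width should give; the wraparound is an accident of Python slicing, not an intended behaviour. — e.g. on generate_windows_sentence([["a", "b", "c", "d", "e"]], -3, 2, none, -1): A returns [[some "a", some "b"], [some "c", some "d"], []], B returns [[], [], []]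
import Mathlib
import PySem

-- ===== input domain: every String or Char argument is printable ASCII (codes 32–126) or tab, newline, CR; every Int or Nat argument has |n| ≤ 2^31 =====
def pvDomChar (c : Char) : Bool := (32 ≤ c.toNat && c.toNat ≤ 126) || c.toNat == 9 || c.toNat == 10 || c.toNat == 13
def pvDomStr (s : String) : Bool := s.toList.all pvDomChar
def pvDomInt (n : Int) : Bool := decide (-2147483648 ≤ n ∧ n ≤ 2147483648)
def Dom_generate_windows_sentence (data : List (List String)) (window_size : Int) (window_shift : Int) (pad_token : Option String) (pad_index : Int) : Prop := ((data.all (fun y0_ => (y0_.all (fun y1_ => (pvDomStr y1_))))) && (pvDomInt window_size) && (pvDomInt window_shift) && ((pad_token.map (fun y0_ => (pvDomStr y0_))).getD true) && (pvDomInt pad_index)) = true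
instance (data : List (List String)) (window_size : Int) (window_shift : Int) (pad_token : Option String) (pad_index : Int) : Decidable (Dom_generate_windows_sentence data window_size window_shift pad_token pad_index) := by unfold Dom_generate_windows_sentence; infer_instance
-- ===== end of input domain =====

-- B walks each sentence's suffixes (emit padded prefix, drop window_shift, repeat) instead of
-- computing start indices and slice bounds; objective: alternative decomposition, not speed.
-- pad_index is unused by both programs.

-- ===== PORT A =====
-- literal port of A: per sentence, list of slices over range(0, len, shift), then per-window padding
def generate_windows_sentence (data : List (List String)) (window_size : Int) (window_shift : Int) (pad_token : Option String) (pad_index : Int) : List (List (Option String)) :=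
  data.foldl (fun windowed_data sentence =>
    let sent : List (Option String) := sentence.map some
    let windowed_inputs :=
      (PySem.List.pyRange 0 (sentence.length : Int) window_shift).map
        (fun i => PySem.List.slice sent (some i) (some (i + window_size)))
    windowed_inputs.foldl (fun acc window_input =>
      acc ++ [window_input ++ List.replicate (window_size - (window_input.length : Int)).toNat pad_token]) windowed_data) []

-- ===== PORT B =====
-- B's window for the current suffix: its width-prefix, padded up to width
def pvBWin (width : Nat) (pad : Option String) (rest : List String) : List (Option String) :=
  let window := (rest.take width).map some
  window ++ List.replicate (width - window.length) pad

-- B's while-loop: emit the window of the current suffix, then drop window_shift (= shm1+1)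
-- elements; fuel = initial length makes the recursion structural (each step drops ≥ 1 element)
def pvAltWindows (width : Nat) (shm1 : Nat) (pad : Option String) : Nat → List String → List (List (Option String))
  | _, [] => []
  | 0, _ :: _ => []
  | fuel + 1, x :: rest' =>
      pvBWin width pad (x :: rest') :: pvAltWindows width shm1 pad fuel (rest'.drop shm1)

-- literal port of B: skip non-positive shifts, else walk the suffixes of the sentence
def generate_windows_sentence_alt (data : List (List String)) (window_size : Int) (window_shift : Int) (pad_token : Option String) (pad_index : Int) : List (List (Option String)) :=
  data.foldl (fun windowed_data sentence =>
    if window_shift ≤ 0 then windowed_data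
    else windowed_data ++
      pvAltWindows window_size.toNat (window_shift.toNat - 1) pad_token sentence.length sentence) []

-- ===== PRECONDITION & SPEC =====
-- Pre_ excludes window_shift = 0 with nonempty data, where Python's range(0, len, 0) raises
-- ValueError in A.
def Pre_generate_windows_sentence (data : List (List String)) (window_size : Int) (window_shift : Int) (pad_token : Option String) (pad_index : Int) : Prop :=
  data = [] ∨ window_shift ≠ 0
instance (data : List (List String)) (window_size : Int) (window_shift : Int) (pad_token : Option String) (pad_index : Int) : Decidable (Pre_generate_windows_sentence data window_size window_shift pad_token pad_index) := by unfold Pre_generate_windows_sentence; infer_instance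

def pvWitness_generate_windows_sentence : List (List String) × Int × Int × Option String × Int :=
  ([["a", "b", "c"], []], 2, 1, some "<pad>", -1)

-- When window_size < 0, window_shift > 0 and some sentence is longer than -window_size, A's stop
-- index i+window_size wraps around as a negative slice bound so A returns windows holding leftover
-- words, while B returns the empty window a non-positive width should give; the wraparound is an
-- accident of Python slicing, not an intended behaviour.
def D_generate_windows_sentence (data : List (List String)) (window_size : Int) (window_shift : Int) (pad_token : Option String) (pad_index : Int) : Prop :=
  window_size < 0 ∧ 0 < window_shift ∧ ∃ s ∈ data, -window_size < (s.length : Int)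
instance (data : List (List String)) (window_size : Int) (window_shift : Int) (pad_token : Option String) (pad_index : Int) : Decidable (D_generate_windows_sentence data window_size window_shift pad_token pad_index) := by unfold D_generate_windows_sentence; infer_instance

def Spec_generate_windows_sentence (data : List (List String)) (window_size : Int) (window_shift : Int) (pad_token : Option String) (pad_index : Int) (out : List (List (Option String))) : Prop := ¬ D_generate_windows_sentence data window_size window_shift pad_token pad_index → out = generate_windows_sentence_alt data window_size window_shift pad_token pad_index
instance (data : List (List String)) (window_size : Int) (window_shift : Int) (pad_token : Option String) (pad_index : Int) (out : List (List (Option String))) : Decidable (Spec_generate_windows_sentence data window_size window_shift pad_token pad_index out) := by unfold Spec_generate_windows_sentence; infer_instance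

def pvDiffWitness_generate_windows_sentence : List (List String) × Int × Int × Option String × Int :=
  ([["a", "b", "c", "d", "e"]], -3, 2, none, -1)

def pvDiffWitnessOut_generate_windows_sentence : (List (List (Option String))) × (List (List (Option String))) :=
  ([[some "a", some "b"], [some "c", some "d"], []], [[], [], []])

-- ===== CLAIM (what is proved, stated in full; the proofs are below) =====
def Claim_unchanged_generate_windows_sentence : Prop := ∀ (data : List (List String)) (window_size : Int) (window_shift : Int) (pad_token : Option String) (pad_index : Int), Dom_generate_windows_sentence data window_size window_shift pad_token pad_index → Pre_generate_windows_sentence data window_size window_shift pad_token pad_index → Spec_generate_windows_sentence data window_size window_shift pad_token pad_index (generate_windows_sentence data window_size window_shift pad_token pad_index)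

def Claim_changed_generate_windows_sentence : Prop := Dom_generate_windows_sentence (pvDiffWitness_generate_windows_sentence.1) (pvDiffWitness_generate_windows_sentence.2.1) (pvDiffWitness_generate_windows_sentence.2.2.1) (pvDiffWitness_generate_windows_sentence.2.2.2.1) (pvDiffWitness_generate_windows_sentence.2.2.2.2) ∧ Pre_generate_windows_sentence (pvDiffWitness_generate_windows_sentence.1) (pvDiffWitness_generate_windows_sentence.2.1) (pvDiffWitness_generate_windows_sentence.2.2.1) (pvDiffWitness_generate_windows_sentence.2.2.2.1) (pvDiffWitness_generate_windows_sentence.2.2.2.2) ∧ D_generate_windows_sentence (pvDiffWitness_generate_windows_sentence.1) (pvDiffWitness_generate_windows_sentence.2.1) (pvDiffWitness_generate_windows_sentence.2.2.1) (pvDiffWitness_generate_windows_sentence.2.2.2.1) (pvDiffWitness_generate_windows_sentence.2.2.2.2) ∧ generate_windows_sentence (pvDiffWitness_generate_windows_sentence.1) (pvDiffWitness_generate_windows_sentence.2.1) (pvDiffWitness_generate_windows_sentence.2.2.1) (pvDiffWitness_generate_windows_sentence.2.2.2.1) (pvDiffWitness_generate_windows_sentence.2.2.2.2) = pvDiffWitnessOut_generate_windows_sentence.1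 ∧ generate_windows_sentence_alt (pvDiffWitness_generate_windows_sentence.1) (pvDiffWitness_generate_windows_sentence.2.1) (pvDiffWitness_generate_windows_sentence.2.2.1) (pvDiffWitness_generate_windows_sentence.2.2.2.1) (pvDiffWitness_generate_windows_sentence.2.2.2.2) = pvDiffWitnessOut_generate_windows_sentence.2 ∧ pvDiffWitnessOut_generate_windows_sentence.1 ≠ pvDiffWitnessOut_generate_windows_sentence.2


def Claim_exact_generate_windows_sentence : Prop := ∀ (data : List (List String)) (window_size : Int) (window_shift : Int) (pad_token : Option String) (pad_index : Int), Dom_generate_windows_sentence data window_size window_shift pad_token pad_index → Pre_generate_windows_sentence data window_size window_shift pad_token pad_index → D_generate_windows_sentence data window_size window_shift pad_token pad_index → generate_windows_sentence data window_size window_shift pad_token pad_index ≠ generate_windows_sentence_alt data window_size window_shift pad_token pad_index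

-- ===== LEMMAS AND PROOFS =====

-- range(0, n, s) is empty for a non-positive stop (positive step)
theorem pv_pyRange_nonpos (n s : Int) (hs : 0 < s) (hn : n ≤ 0) :
    PySem.List.pyRange 0 n s = [] := by
  rw [PySem.List.pyRange_of_pos _ _ hs]
  simp [show ¬ (0:Int) < n from not_lt.mpr hn]

-- range(0, n, s) is empty for a negative step and n ≥ 0
theorem pv_pyRange_neg_step (n s : Int) (hs : s < 0) (hn : 0 ≤ n) :
    PySem.List.pyRange 0 n s = [] := by
  simp [PySem.List.pyRange, hs.ne, if_neg (not_lt.mpr hs.le), if_neg (not_lt.mpr hn)]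

-- peel the first start index off range(0, n, s) for positive step and stop
theorem pv_pyRange_pos_cons (n s : Int) (hs : 0 < s) (hn : 0 < n) :
    PySem.List.pyRange 0 n s = 0 :: (PySem.List.pyRange 0 (n - s) s).map (· + s) := by
  rw [PySem.List.pyRange_of_pos _ _ hs, PySem.List.pyRange_of_pos _ _ hs]
  have hdiv : (n + s - 1) / s = (n - 1) / s + 1 := by
    have h := Int.add_mul_ediv_right (n - 1) 1 (ne_of_gt hs)
    have : n + s - 1 = n - 1 + 1 * s := by ring
    rw [this, h]
  have hnn : 0 ≤ (n - 1) / s := Int.ediv_nonneg (by omega) hs.le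
  have hcnt : (if (0:Int) < n then ((n - 0 + s - 1) / s).toNat else 0) = ((n - 1) / s).toNat + 1 := by
    rw [if_pos hn]
    have : n - 0 + s - 1 = n + s - 1 := by ring
    rw [this, hdiv]; omega
  have hcnt' : (if (0:Int) < n - s then ((n - s - 0 + s - 1) / s).toNat else 0) = ((n - 1) / s).toNat := by
    split_ifs with h
    · congr 1; congr 1; ring
    · have h0 : (n - 1) / s = 0 := Int.ediv_eq_zero_of_lt (by omega) (by omega)
      rw [h0]; rfl
  rw [hcnt, hcnt', List.range_succ_eq_map, List.map_cons, List.map_map, List.map_map]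
  congr 1
  · simp
  apply List.map_congr_left
  intro k _
  simp [Nat.succ_eq_add_one]
  ring
-- outside the wrap region, A's padded slice at start i is B's window of the suffix from i
theorem pv_window_eq (sentence : List String) (pad : Option String) (ws i : Int)
    (hi : 0 ≤ i) (hlt : i < (sentence.length : Int))
    (hws : 0 ≤ ws ∨ (sentence.length : Int) ≤ -ws) :
    PySem.List.slice (sentence.map some) (some i) (some (i + ws)) ++
      List.replicate (ws - ((PySem.List.slice (sentence.map some) (some i) (some (i + ws))).length : Int)).toNat pad
    = pvBWin ws.toNat pad (sentence.drop i.toNat) := by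
  rcases hws with hws | hws
  · rw [PySem.List.slice_toNat _ hi (by omega)]
    have h1 : (i + ws).toNat - i.toNat = ws.toNat := by omega
    rw [h1, ← List.map_drop, ← List.map_take]
    simp only [pvBWin]
    congr 1
    simp only [List.length_map, List.length_take, List.length_drop]
    congr 1
    omega
  · -- here ws < 0 deep enough that A's wrapped slice is empty too
    have hempty : PySem.List.slice (sentence.map some) (some i) (some (i + ws)) = [] := by
      simp only [PySem.List.slice, PySem.List.clampIdx, List.length_map]
      split_ifs <;> simp <;> omega
    have hw0 : ws.toNat = 0 := by omega
    have hr0 : (ws - ((0:Nat) : Int)).toNat = 0 := by omega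
    simp [hempty, pvBWin, hw0]

-- A's per-sentence window list over range(0, len, s'+1) IS B's suffix walk
theorem pv_map_range_eq_alt (w s' : Nat) (pad : Option String) :
    ∀ (fuel : Nat) (sentence : List String), sentence.length ≤ fuel →
      (PySem.List.pyRange 0 (sentence.length : Int) ((s' : Int) + 1)).map
        (fun i => pvBWin w pad (sentence.drop i.toNat))
      = pvAltWindows w s' pad fuel sentence := by
  intro fuel
  induction fuel with
  | zero =>
    intro sentence hle
    have : sentence = [] := List.length_eq_zero_iff.mp (Nat.le_zero.mp hle)
    subst this
    simp [pvAltWindows, pv_pyRange_nonpos 0 ((s' : Int) + 1) (by omega) le_rfl]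
  | succ fuel ih =>
    intro sentence hle
    match sentence with
    | [] => simp [pvAltWindows, pv_pyRange_nonpos 0 ((s' : Int) + 1) (by omega) le_rfl]
    | x :: t =>
      have hn : 0 < (((x :: t).length : Int)) := by simp
      have hih := ih (t.drop s') (by simp at hle ⊢; omega)
      have htail :
          List.map ((fun i => pvBWin w pad (List.drop i.toNat (x :: t))) ∘
              fun i => i + ((s' : Int) + 1))
            (PySem.List.pyRange 0 (((x :: t).length : Int) - ((s' : Int) + 1)) ((s' : Int) + 1))
          = pvAltWindows w s' pad fuel (t.drop s') := by
        by_cases hc : s' ≤ t.length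
        · have hb : (((t.drop s').length : Int)) = ((x :: t).length : Int) - ((s' : Int) + 1) := by
            simp [List.length_drop]; omega
          rw [← hih, hb]
          apply List.map_congr_left
          intro i himem
          obtain ⟨hi0, _, _⟩ := (PySem.List.mem_pyRange_iff_of_pos (by omega) i).mp himem
          simp only [Function.comp]
          have h2 : (i + ((s' : Int) + 1)).toNat = (i.toNat + s') + 1 := by omega
          rw [h2, List.drop_succ_cons, List.drop_drop, Nat.add_comm s' i.toNat]
        · have h1 : PySem.List.pyRange 0 (((x :: t).length : Int) - ((s' : Int) + 1)) ((s' : Int) + 1) = [] :=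
            pv_pyRange_nonpos _ _ (by omega) (by simp; omega)
          have h2 : t.drop s' = [] := by
            apply List.eq_nil_of_length_eq_zero
            simp [List.length_drop]
            omega
          rw [h1, ← hih, h2]
          simp [pv_pyRange_nonpos 0 ((s' : Int) + 1) (by omega) le_rfl]
      rw [pv_pyRange_pos_cons _ _ (by omega) hn, List.map_cons, List.map_map, htail]
      simp [pvAltWindows]

-- the per-sentence steps of the two ports agree outside the wrap region
theorem pv_step_eq (ws sh : Int) (pad : Option String) (acc : List (List (Option String)))
    (sentence : List String) (hsh : sh ≠ 0)
    (hws : ¬ (ws < 0 ∧ 0 < sh ∧ -ws < (sentence.length : Int))) :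
    (let sent : List (Option String) := sentence.map some
     let windowed_inputs :=
       (PySem.List.pyRange 0 (sentence.length : Int) sh).map
         (fun i => PySem.List.slice sent (some i) (some (i + ws)))
     windowed_inputs.foldl (fun a w =>
       a ++ [w ++ List.replicate (ws - (w.length : Int)).toNat pad]) acc)
    = (if sh ≤ 0 then acc
       else acc ++ pvAltWindows ws.toNat (sh.toNat - 1) pad sentence.length sentence) := by
  simp only [PySem.List.foldl_append_singleton_eq_map, List.map_map]
  rcases lt_or_gt_of_ne hsh with hneg | hpos
  · rw [pv_pyRange_neg_step _ _ hneg (by omega), if_pos hneg.le]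
    simp
  · rw [if_neg (not_le.mpr hpos)]
    congr 1
    have hsplit : 0 ≤ ws ∨ (sentence.length : Int) ≤ -ws := by
      by_cases h : 0 ≤ ws
      · exact Or.inl h
      · right
        by_contra hc
        exact hws ⟨by omega, hpos, by omega⟩
    have hsh' : ((sh.toNat - 1 : Nat) : Int) + 1 = sh := by omega
    rw [← pv_map_range_eq_alt ws.toNat (sh.toNat - 1) pad sentence.length sentence le_rfl, hsh']
    apply List.map_congr_left
    intro i himem
    obtain ⟨hi0, hin, _⟩ := (PySem.List.mem_pyRange_iff_of_pos hpos i).mp himem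
    exact pv_window_eq sentence pad ws i hi0 hin hsplit

-- flatMaps of length-aligned piece functions differ once some piece differs
theorem pv_flatMap_ne {α β : Type} (f g : α → List β)
    (hlen : ∀ s, (f s).length = (g s).length) :
    ∀ data : List α, (∃ s ∈ data, f s ≠ g s) → data.flatMap f ≠ data.flatMap g := by
  intro data
  induction data with
  | nil => rintro ⟨s, hs, _⟩; cases hs
  | cons a l ih =>
    rintro ⟨s, hs, hne⟩ heq
    rw [List.flatMap_cons, List.flatMap_cons] at heq
    obtain ⟨h1, h2⟩ := List.append_inj heq (hlen a)
    rcases List.mem_cons.mp hs with hs' | hs'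
    · exact hne (hs' ▸ h1)
    · exact ih ⟨s, hs', hne⟩ h2

-- inside D_, A's first window on any long-enough sentence is nonempty
theorem pv_wrap_head_ne (s0 : List String) (pad : Option String) (ws : Int)
    (hws : ws < 0) (hlen : -ws < (s0.length : Int)) :
    PySem.List.slice (s0.map some) (some 0) (some (0 + ws)) ++
      List.replicate (ws - ((PySem.List.slice (s0.map some) (some 0) (some (0 + ws))).length : Int)).toNat pad
    ≠ ([] : List (Option String)) := by
  intro heq
  have h0 : PySem.List.slice (s0.map some) (some 0) (some (0 + ws)) = [] :=
    List.eq_nil_of_append_eq_nil heq |>.1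
  have hl := PySem.List.length_slice (s0.map some) 0 (0 + ws)
  rw [h0] at hl
  simp only [PySem.List.clampIdx, List.length_map, List.length_nil] at hl
  split_ifs at hl <;> omega

-- ===== VERDICT (by name: the statement is the Claim_ definition above) =====
theorem generate_windows_sentence_spec : Claim_unchanged_generate_windows_sentence := by
  intro data ws sh pad pidx _ hpre hnd
  unfold generate_windows_sentence generate_windows_sentence_alt
  apply PySem.List.foldl_congr_mem
  intro acc sentence hmem
  have hsh : sh ≠ 0 := by
    rcases hpre with h | h
    · subst h; simp at hmem
    · exact h
  apply pv_step_eq ws sh pad acc sentence hsh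
  intro ⟨h1, h2, h3⟩
  exact hnd ⟨h1, h2, sentence, hmem, h3⟩

theorem generate_windows_sentence_changed : Claim_changed_generate_windows_sentence := by
  unfold Claim_changed_generate_windows_sentence; decide

theorem generate_windows_sentence_tight : Claim_exact_generate_windows_sentence := by
  intro data ws sh pad pidx hdom hpre hd
  obtain ⟨hws, hsh, s0, hs0mem, hs0len⟩ := hd
  unfold generate_windows_sentence generate_windows_sentence_alt
  have hstepA : (fun (windowed_data : List (List (Option String))) (sentence : List String) =>
      let sent : List (Option String) := sentence.map some
      let windowed_inputs :=
        (PySem.List.pyRange 0 (sentence.length : Int) sh).map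
          (fun i => PySem.List.slice sent (some i) (some (i + ws)))
      windowed_inputs.foldl (fun acc window_input =>
        acc ++ [window_input ++ List.replicate (ws - (window_input.length : Int)).toNat pad]) windowed_data)
      = fun windowed_data sentence => windowed_data ++
          (PySem.List.pyRange 0 (sentence.length : Int) sh).map
            (fun i => PySem.List.slice (sentence.map some) (some i) (some (i + ws)) ++
              List.replicate (ws - ((PySem.List.slice (sentence.map some) (some i) (some (i + ws))).length : Int)).toNat pad) := by
    funext acc sentence
    simp only [PySem.List.foldl_append_singleton_eq_map, List.map_map]
    rfl
  have hstepB : (fun (windowed_data : List (List (Option String))) (sentence : List String) =>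
      if sh ≤ 0 then windowed_data
      else windowed_data ++
        pvAltWindows ws.toNat (sh.toNat - 1) pad sentence.length sentence)
      = fun windowed_data sentence => windowed_data ++
          pvAltWindows ws.toNat (sh.toNat - 1) pad sentence.length sentence := by
    funext acc sentence
    rw [if_neg (not_le.mpr hsh)]
  rw [hstepA, hstepB, PySem.List.foldl_append_eq_flatMap, PySem.List.foldl_append_eq_flatMap,
    List.nil_append, List.nil_append]
  have hsh' : ((sh.toNat - 1 : Nat) : Int) + 1 = sh := by omega
  apply pv_flatMap_ne
  · intro s
    rw [← pv_map_range_eq_alt ws.toNat (sh.toNat - 1) pad s.length s le_rfl, hsh']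
    simp
  · refine ⟨s0, hs0mem, ?_⟩
    rw [← pv_map_range_eq_alt ws.toNat (sh.toNat - 1) pad s0.length s0 le_rfl, hsh']
    have hn0 : 0 < (s0.length : Int) := by omega
    rw [pv_pyRange_pos_cons _ _ hsh hn0, List.map_cons, List.map_cons]
    intro heq
    have hhead := (List.cons.injEq _ _ _ _ ▸ heq).1
    refine pv_wrap_head_ne s0 pad ws hws hs0len ?_
    rw [hhead]
    have hw0 : ws.toNat = 0 := by omega
    simp [pvBWin, hw0]
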